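-- pv_equiv track=rewrite | github.com/sachit01/aosct | aos_bhp/scripts/checkIndependency.py | getChangeNumber
-- ===== SOURCE A (Python) =====
-- def atoi(string, index):
--     number = 0
--
--     while index < len(string):
--         char = ord(string[index])
--         if char >= 0x30 and char <= 0x39:
--             number = (char - 0x30) + number * 10
--         else:
--             break
--         index += 1
--
--     return number
--
-- def getChangeNumber(url):
--     index = len(url)
--
--     while index > 0:
--         char = ord(url[index - 1])
--         if char < 0x30 or char > 0x39:
--             break
--         index -= 1
--
--     return atoi(url, index)
-- ===== SOURCE B (Python) =====
-- def getChangeNumber(url):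
--     number = 0
--     for ch in url:
--         if '0' <= ch <= '9':
--             number = number * 10 + (ord(ch) - 0x30)
--         else:
--             number = 0
--     return number
-- ===== Notes on version B (the rewrite author's own statement) =====
-- stated objective: simpler
-- what changed: Replaces the backward scan for the start of the trailing digit run plus the separate forward atoi helper with one left-to-right sweep that accumulates digits and resets to 0 on every non-digit.
import Mathlib
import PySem

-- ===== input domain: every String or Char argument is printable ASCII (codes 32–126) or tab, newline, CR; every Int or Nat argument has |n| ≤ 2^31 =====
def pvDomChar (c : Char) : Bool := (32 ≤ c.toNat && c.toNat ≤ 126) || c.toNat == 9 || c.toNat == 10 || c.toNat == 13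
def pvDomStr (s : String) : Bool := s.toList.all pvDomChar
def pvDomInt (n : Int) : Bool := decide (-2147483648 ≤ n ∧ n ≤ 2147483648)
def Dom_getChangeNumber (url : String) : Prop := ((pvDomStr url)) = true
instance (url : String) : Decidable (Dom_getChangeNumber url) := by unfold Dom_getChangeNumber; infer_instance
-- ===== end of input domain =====

-- B replaces A's backward scan + separate forward atoi with a single left-to-right
-- sweep that accumulates digit values and resets to 0 on every non-digit (simpler).


-- ===== PORT A =====
-- helper atoi: while index < len: take digit, accumulate '(char-0x30) + number*10', else break
def atoiGo : List Char → Int → Int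
  | [], number => number
  | c :: cs, number =>
    if 48 ≤ c.toNat ∧ c.toNat ≤ 57 then
      atoiGo cs (((c.toNat : Int) - 48) + number * 10)
    else number

def atoi (s : List Char) (index : Nat) : Int := atoiGo (s.drop index) 0

-- backward loop of getChangeNumber: while index > 0: break on non-digit at index-1, else index -= 1
def backGo (s : List Char) : Nat → Nat
  | 0 => 0
  | i + 1 =>
    if (s.getD i ' ').toNat < 48 ∨ 57 < (s.getD i ' ').toNat then i + 1
    else backGo s i

def getChangeNumber (url : String) : Int :=
  atoi url.toList (backGo url.toList url.toList.length)

-- ===== PORT B =====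
def getChangeNumber_alt (url : String) : Int :=
  url.toList.foldl
    (fun number ch =>
      if '0' ≤ ch ∧ ch ≤ '9' then number * 10 + ((ch.toNat : Int) - 48) else 0) 0

-- ===== PRECONDITION & SPEC =====
def Spec_getChangeNumber (url : String) (out : Int) : Prop := out = getChangeNumber_alt url
instance (url : String) (out : Int) : Decidable (Spec_getChangeNumber url out) := by unfold Spec_getChangeNumber; infer_instance

-- ===== CLAIM (what is proved, stated in full; the proofs are below) =====
def Claim_equal_getChangeNumber : Prop := ∀ (url : String), Dom_getChangeNumber url → Spec_getChangeNumber url (getChangeNumber url)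

-- ===== LEMMAS AND PROOFS =====

theorem backGo_le (s : List Char) : ∀ i, backGo s i ≤ i := by
  intro i
  induction i with
  | zero => simp [backGo]
  | succ i ih =>
    simp only [backGo]
    split
    · exact le_rfl
    · exact Nat.le_succ_of_le ih

theorem backGo_append (s t : List Char) : ∀ i, i ≤ s.length → backGo (s ++ t) i = backGo s i := by
  intro i
  induction i with
  | zero => intro _; rfl
  | succ i ih =>
    intro h
    have hi : i < s.length := h
    simp only [backGo, List.getD_append _ _ _ _ hi]
    split
    · rfl
    · exact ih (Nat.le_of_lt hi)

theorem backGo_digits (s : List Char) :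
    ∀ i, ∀ j, backGo s i ≤ j → j < i →
      48 ≤ (s.getD j ' ').toNat ∧ (s.getD j ' ').toNat ≤ 57 := by
  intro i
  induction i with
  | zero => intro j _ h; omega
  | succ i ih =>
    intro j h1 h2
    simp only [backGo] at h1
    split at h1
    · omega
    · rename_i hdig
      rcases Nat.lt_succ_iff_lt_or_eq.mp h2 with h | h
      · exact ih j h1 h
      · subst h; omega

theorem atoiGo_all_digits (ys : List Char)
    (h : ∀ c ∈ ys, 48 ≤ c.toNat ∧ c.toNat ≤ 57) :
    ∀ n, atoiGo ys n = ys.foldl (fun n c => n * 10 + ((c.toNat : Int) - 48)) n := by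
  induction ys with
  | nil => intro n; rfl
  | cons c cs ih =>
    intro n
    have hc := h c (by simp)
    simp only [atoiGo, List.foldl_cons, if_pos hc]
    rw [show ((c.toNat : Int) - 48) + n * 10 = n * 10 + ((c.toNat : Int) - 48) by ring]
    exact ih (fun d hd => h d (by simp [hd])) _

theorem drop_backGo_digits (s : List Char) :
    ∀ c ∈ s.drop (backGo s s.length), 48 ≤ c.toNat ∧ c.toNat ≤ 57 := by
  intro c hc
  rw [List.mem_iff_getElem] at hc
  obtain ⟨k, hk, he⟩ := hc
  rw [List.getElem_drop] at he
  have hlen : backGo s s.length + k < s.length := by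
    have := backGo_le s s.length
    simp [List.length_drop] at hk
    omega
  have := backGo_digits s s.length (backGo s s.length + k)
    (Nat.le_add_right _ _) hlen
  rwa [List.getD_eq_getElem s ' ' hlen, he] at this

theorem main_list (s : List Char) :
    atoiGo (s.drop (backGo s s.length)) 0 =
      s.foldl (fun number ch =>
        if '0' ≤ ch ∧ ch ≤ '9' then number * 10 + ((ch.toNat : Int) - 48) else 0) 0 := by
  induction s using List.reverseRecOn with
  | nil => rfl
  | append_singleton xs c ih =>
    have hlast : (xs ++ [c]).getD xs.length ' ' = c := by
      simp [List.getD_eq_getElem?_getD]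
    by_cases hdig : 48 ≤ c.toNat ∧ c.toNat ≤ 57
    · -- last char is a digit
      have hd := backGo_le xs xs.length
      have hback : backGo (xs ++ [c]) (xs ++ [c]).length = backGo xs xs.length := by
        simp only [List.length_append, List.length_cons, List.length_nil]
        show backGo (xs ++ [c]) (xs.length + 1) = _
        simp only [backGo, hlast]
        rw [if_neg (by omega)]
        exact backGo_append xs [c] xs.length le_rfl
      rw [hback, List.drop_append_of_le_length hd]
      have hall : ∀ e ∈ xs.drop (backGo xs xs.length) ++ [c],
          48 ≤ e.toNat ∧ e.toNat ≤ 57 := by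
        intro e he
        rcases List.mem_append.mp he with h | h
        · exact drop_backGo_digits xs e h
        · simp at h; subst h; exact hdig
      rw [atoiGo_all_digits _ hall, List.foldl_append, List.foldl_append]
      have hall' := fun e he => hall e (List.mem_append.mpr (Or.inl he))
      rw [← atoiGo_all_digits _ hall', ih]
      simp only [List.foldl_cons, List.foldl_nil]
      rw [if_pos (show ('0' ≤ c ∧ c ≤ '9') from hdig)]
    · -- last char is not a digit
      have hback : backGo (xs ++ [c]) (xs ++ [c]).length = xs.length + 1 := by
        simp only [List.length_append, List.length_cons, List.length_nil]
        show backGo (xs ++ [c]) (xs.length + 1) = _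
        simp only [backGo, hlast]
        rw [if_pos (by omega)]
      rw [hback]
      have : (xs ++ [c]).drop (xs.length + 1) = [] := by
        apply List.drop_eq_nil_of_le; simp
      rw [this]
      simp only [List.foldl_append, List.foldl_cons, List.foldl_nil]
      rw [if_neg (show ¬('0' ≤ c ∧ c ≤ '9') from hdig)]
      rfl

-- ===== VERDICT (by name: the statement is the Claim_ definition above) =====
theorem getChangeNumber_spec : Claim_equal_getChangeNumber := by
  intro url _
  show getChangeNumber url = getChangeNumber_alt url
  exact main_list url.toList
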